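-- pv_equiv track=rewrite | github.com/franm7/introduction-to-ai-assignments | lab2py/solution.py | checkTautology
-- ===== SOURCE A (Python) =====
-- def checkTautology(list1):
--     for i in range(0, len(list1)):
--         for j in range(1, len(list1)):
--             if list1[i] == list1[j].replace('~', '') and i != j:
--                 return False
--             if list1[i].replace('~', '') == list1[j] and i != j:
--                 return False
--
--     return True
-- ===== SOURCE B (Python) =====
-- def checkTautology(list1):
--     seen_elems = set()
--     seen_keys = set()
--     for s in list1:
--         k = s.replace('~', '')
--         if k in seen_elems or s in seen_keys:
--             return False
--         seen_elems.add(s)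
--         seen_keys.add(k)
--     return True
-- ===== Notes on version B (the rewrite author's own statement) =====
-- stated objective: alternative
-- what changed: Replaces the nested pairwise index scan with a single pass that maintains two hash sets (elements seen and their tilde-stripped forms) and fails as soon as the current element's stripped form was already seen as an element or the element itself is a stripped form of an earlier one; O(n*m) worst case vs A's O(n^2*m), though A's early exit can win on clash-heavy inputs.
import Mathlib
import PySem

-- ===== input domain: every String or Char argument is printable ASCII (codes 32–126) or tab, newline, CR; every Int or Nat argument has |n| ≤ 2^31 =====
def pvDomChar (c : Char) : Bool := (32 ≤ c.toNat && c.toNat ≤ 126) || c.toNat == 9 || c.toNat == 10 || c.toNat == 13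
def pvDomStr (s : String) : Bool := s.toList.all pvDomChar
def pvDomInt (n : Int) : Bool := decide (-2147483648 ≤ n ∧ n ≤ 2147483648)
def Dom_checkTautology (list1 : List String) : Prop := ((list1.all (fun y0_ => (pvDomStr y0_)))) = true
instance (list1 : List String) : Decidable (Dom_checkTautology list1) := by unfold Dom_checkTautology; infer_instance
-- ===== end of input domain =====

-- B replaces A's nested pairwise scan by a single pass keeping two sets
-- (elements seen, and their tilde-stripped forms); objective: alternative (linear-time single pass).

-- ===== PORT A =====
-- literal port of A's nested for-loops with early return False
def checkTautology (list1 : List String) : Bool :=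
  (PySem.List.pyRange 0 list1.length 1).all fun i =>
    (PySem.List.pyRange 1 list1.length 1).all fun j =>
      !(((PySem.List.pyGetD list1 i "" == PySem.Str.replace (PySem.List.pyGetD list1 j "") "~" "") && i != j) ||
        ((PySem.Str.replace (PySem.List.pyGetD list1 i "") "~" "" == PySem.List.pyGetD list1 j "") && i != j))

-- ===== PORT B =====
-- B's loop over the elements, carrying the two sets seen_elems / seen_keys
def altLoop (seenElems seenKeys : PySem.Set String) : List String → Bool
  | [] => true
  | s :: rest =>
    let k := PySem.Str.replace s "~" ""
    if PySem.Set.contains seenElems k || PySem.Set.contains seenKeys s then false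
    else altLoop (PySem.Set.add seenElems s) (PySem.Set.add seenKeys k) rest

def checkTautology_alt (list1 : List String) : Bool :=
  altLoop PySem.Set.empty PySem.Set.empty list1

-- ===== PRECONDITION & SPEC =====
def Spec_checkTautology (list1 : List String) (out : Bool) : Prop := out = checkTautology_alt list1
instance (list1 : List String) (out : Bool) : Decidable (Spec_checkTautology list1 out) := by unfold Spec_checkTautology; infer_instance

-- ===== CLAIM (what is proved, stated in full; the proofs are below) =====
def Claim_equal_checkTautology : Prop := ∀ (list1 : List String), Dom_checkTautology list1 → Spec_checkTautology list1 (checkTautology list1)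

-- ===== LEMMAS AND PROOFS =====

-- the tilde-stripped form
def strp (s : String) : String := PySem.Str.replace s "~" ""

-- the "no-clash" relation both programs test pairwise
def Rok (a b : String) : Prop := strp b ≠ a ∧ b ≠ strp a

theorem altLoop_cons (S K : PySem.Set String) (s : String) (rest : List String) :
    altLoop S K (s :: rest) =
      if strp s ∈ S ∨ s ∈ K then false
      else altLoop (S.add s) (K.add (strp s)) rest := by
  have h : (S.contains (PySem.Str.replace s "~" "") || K.contains s) = true ↔ (strp s ∈ S ∨ s ∈ K) := by
    simp [strp]
  simp only [altLoop]
  by_cases hc : strp s ∈ S ∨ s ∈ K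
  · rw [if_pos (h.mpr hc), if_pos hc]
  · rw [if_neg (fun hh => hc (h.mp hh)), if_neg hc]; rfl

-- B's loop characterized: true iff no element clashes with the carried sets and xs is pairwise clash-free
theorem altLoop_iff (xs : List String) : ∀ (S K : PySem.Set String),
    altLoop S K xs = true ↔
      ((∀ b ∈ xs, strp b ∉ S ∧ b ∉ K) ∧ xs.Pairwise Rok) := by
  induction xs with
  | nil => intro S K; simp [altLoop]
  | cons s rest ih =>
    intro S K
    rw [altLoop_cons]
    by_cases hc : strp s ∈ S ∨ s ∈ K
    · rw [if_pos hc]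
      simp only [Bool.false_eq_true, false_iff]
      rintro ⟨hall, -⟩
      rcases hall s (List.mem_cons_self ..) with ⟨h1, h2⟩
      rcases hc with hc | hc
      · exact h1 hc
      · exact h2 hc
    · rw [if_neg hc, ih]
      have hS : strp s ∉ S := fun h => hc (Or.inl h)
      have hK : s ∉ K := fun h => hc (Or.inr h)
      simp only [PySem.Set.mem_add, List.mem_cons, List.pairwise_cons, not_or]
      constructor
      · rintro ⟨hall, hpw⟩
        refine ⟨?_, ?_, hpw⟩
        · rintro b (rfl | hb)
          · exact ⟨hS, hK⟩
          · exact ⟨(hall b hb).1.1, (hall b hb).2.1⟩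
        · intro b hb
          exact ⟨(hall b hb).1.2, (hall b hb).2.2⟩
      · rintro ⟨hall, hhead, hpw⟩
        refine ⟨?_, hpw⟩
        intro b hb
        exact ⟨⟨(hall b (Or.inr hb)).1, (hhead b hb).1⟩,
               ⟨(hall b (Or.inr hb)).2, (hhead b hb).2⟩⟩

theorem alt_iff (xs : List String) :
    checkTautology_alt xs = true ↔ xs.Pairwise Rok := by
  rw [checkTautology_alt, altLoop_iff]
  simp [PySem.Set.empty]

-- A characterized: the nested index loops test exactly pairwise clash-freeness
theorem a_iff (xs : List String) :
    checkTautology xs = true ↔ xs.Pairwise Rok := by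
  rw [checkTautology]
  simp only [List.all_eq_true, PySem.List.mem_pyRange_one, Bool.not_eq_true',
    Bool.or_eq_false_iff, Bool.and_eq_false_iff, beq_eq_false_iff_ne, bne_eq_false_iff_eq]
  constructor
  · intro h
    rw [List.pairwise_iff_getElem]
    intro i j hi hj hij
    have h0i : (0 : Int) ≤ (i : Int) := by positivity
    have hin : (i : Int) < xs.length := by exact_mod_cast hi
    have h1j : (1 : Int) ≤ (j : Int) := by omega
    have hjn : (j : Int) < xs.length := by exact_mod_cast hj
    have hgi : PySem.List.pyGetD xs (i : Int) "" = xs[i] := by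
      rw [PySem.List.pyGetD_eq_getElem xs "" h0i hin]; simp
    have hgj : PySem.List.pyGetD xs (j : Int) "" = xs[j] := by
      rw [PySem.List.pyGetD_eq_getElem xs "" (by positivity) hjn]; simp
    have hthis := h (i : Int) ⟨h0i, hin⟩ (j : Int) ⟨h1j, hjn⟩
    rw [hgi, hgj] at hthis
    obtain ⟨c1, c2⟩ := hthis
    have hne : (i : Int) ≠ (j : Int) := by exact_mod_cast Nat.ne_of_lt hij
    rcases c1 with c1 | c1
    · rcases c2 with c2 | c2
      · exact ⟨fun he => c1 he.symm, fun he => c2 he.symm⟩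
      · exact absurd c2 hne
    · exact absurd c1 hne
  · intro hpw
    rw [List.pairwise_iff_getElem] at hpw
    intro i hi j hj
    rcases hi with ⟨h0i, hin⟩
    rcases hj with ⟨h1j, hjn⟩
    by_cases hij : i = j
    · exact ⟨Or.inr hij, Or.inr hij⟩
    · have hgi : PySem.List.pyGetD xs i "" = xs[i.toNat]'(by omega) := by
        rw [PySem.List.pyGetD_eq_getElem xs "" h0i hin]
      have hgj : PySem.List.pyGetD xs j "" = xs[j.toNat]'(by omega) := by
        rw [PySem.List.pyGetD_eq_getElem xs "" (by omega) hjn]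
      rw [hgi, hgj]
      rcases lt_or_gt_of_ne hij with hlt | hgt
      · have hr := hpw i.toNat j.toNat (by omega) (by omega) (by omega)
        exact ⟨Or.inl (fun he => hr.1 he.symm), Or.inl (fun he => hr.2 he.symm)⟩
      · have hr := hpw j.toNat i.toNat (by omega) (by omega) (by omega)
        exact ⟨Or.inl hr.2, Or.inl hr.1⟩

-- ===== VERDICT (by name: the statement is the Claim_ definition above) =====
theorem checkTautology_spec : Claim_equal_checkTautology := by
  intro list1 _
  unfold Spec_checkTautology
  have h := (a_iff list1).trans (alt_iff list1).symm
  cases hA : checkTautology list1 <;> cases hB : checkTautology_alt list1 <;> simp_all
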